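-- pv_equiv track=rewrite | github.com/rafaelFacundo/digital_signal_processing | lowPassFIlter.py | rectangularWindow
-- ===== SOURCE A (Python) =====
-- import math
--
-- def rectangularWindow(M):
--     w = []
--     limit = 0;
--     if M % 2 == 0:
--         limit = math.floor(M/2)
--         for n in range(-limit, limit):
--             w.append(1);
--         w = [0]*limit + w + [0]*limit;
--     else:
--         limit = math.floor((M-1)/2)
--         for n in range(-limit, (limit+1)):
--             w.append(1)
--         w = [0]*limit + w + [0]*(limit+1)
--     return w
-- ===== SOURCE B (Python) =====
-- def rectangularWindow(M):
--     lo = M // 2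
--     return [1 if lo <= i < lo + M else 0 for i in range(2 * M)]
-- ===== Notes on version B (the rewrite author's own statement) =====
-- stated objective: simpler
-- what changed: Replaces the even/odd branch that builds a middle block of ones and concatenates zero padding with a single index-based pass over all 2*M positions, deciding each element as 1 iff M//2 <= i < M//2 + M.
import Mathlib
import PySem

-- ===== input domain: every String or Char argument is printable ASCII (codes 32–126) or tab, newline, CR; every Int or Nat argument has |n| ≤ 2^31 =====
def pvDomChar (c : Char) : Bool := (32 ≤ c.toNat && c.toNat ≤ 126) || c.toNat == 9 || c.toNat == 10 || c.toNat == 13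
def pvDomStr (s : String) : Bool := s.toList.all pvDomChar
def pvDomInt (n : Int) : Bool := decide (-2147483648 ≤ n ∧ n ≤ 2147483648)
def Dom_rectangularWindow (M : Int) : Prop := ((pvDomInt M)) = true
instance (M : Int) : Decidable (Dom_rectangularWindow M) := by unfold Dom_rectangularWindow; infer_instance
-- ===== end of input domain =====

-- B replaces A's even/odd branch plus three-segment concatenation with one index-based
-- pass over all 2*M positions (1 iff M//2 <= i < M//2 + M); objective: simpler, same cost.

-- ===== PORT A =====
-- math.floor(M/2) / math.floor((M-1)/2): the numerator is even in its branch and |M| ≤ 2^31,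
-- so the float division is exact and its floor equals Python's floor division.
-- [0]*n for n ≤ 0 is []; Int.toNat clamps negatives to 0, so List.replicate n.toNat matches exactly.
def rectangularWindow (M : Int) : List Int :=
  if PySem.Int.mod M 2 == 0 then
    let limit := PySem.Int.floordiv M 2
    let w := (PySem.List.pyRange (-limit) limit 1).foldl (fun acc _ => acc ++ [(1 : Int)]) []
    List.replicate limit.toNat 0 ++ w ++ List.replicate limit.toNat 0
  else
    let limit := PySem.Int.floordiv (M - 1) 2
    let w := (PySem.List.pyRange (-limit) (limit + 1) 1).foldl (fun acc _ => acc ++ [(1 : Int)]) []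
    List.replicate limit.toNat 0 ++ w ++ List.replicate (limit + 1).toNat 0

-- ===== PORT B =====
def rectangularWindow_alt (M : Int) : List Int :=
  let lo := PySem.Int.floordiv M 2
  (PySem.List.pyRange 0 (2 * M) 1).map (fun i => if lo ≤ i ∧ i < lo + M then 1 else 0)

-- ===== PRECONDITION & SPEC =====
def Spec_rectangularWindow (M : Int) (out : List Int) : Prop := out = rectangularWindow_alt M
instance (M : Int) (out : List Int) : Decidable (Spec_rectangularWindow M out) := by unfold Spec_rectangularWindow; infer_instance

-- ===== CLAIM (what is proved, stated in full; the proofs are below) =====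
def Claim_equal_rectangularWindow : Prop := ∀ (M : Int), Dom_rectangularWindow M → Spec_rectangularWindow M (rectangularWindow M)

-- ===== LEMMAS AND PROOFS =====

-- a map that is constant on a range is a replicate
lemma map_pyRange_const (a b c : Int) (f : Int → Int)
    (h : ∀ x, a ≤ x → x < b → f x = c) :
    (PySem.List.pyRange a b 1).map f = List.replicate (b - a).toNat c := by
  rw [List.map_congr_left (fun x hx => by
        have hm := PySem.List.mem_pyRange_one.mp hx
        exact h x hm.1 hm.2),
      List.map_const', PySem.List.length_pyRange_one]

-- A's append loop builds a block of ones
lemma fold_ones (a b : Int) :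
    (PySem.List.pyRange a b 1).foldl (fun acc _ => acc ++ [(1 : Int)]) [] =
      List.replicate (b - a).toNat 1 := by
  rw [show (fun (acc : List Int) (_ : Int) => acc ++ [(1 : Int)]) =
        (fun (acc : List Int) (x : Int) => acc ++ [(fun _ => (1 : Int)) x]) from rfl,
      PySem.List.foldl_append_singleton_eq_map, List.nil_append,
      map_pyRange_const a b 1 _ (fun _ _ _ => rfl)]

-- splitting B's single pass into three constant segments
lemma alt_split (a b c : Int) (ha : 0 ≤ a) (hb : 0 ≤ b) (hc : 0 ≤ c) :
    (PySem.List.pyRange 0 (a + b + c) 1).map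
        (fun i => if a ≤ i ∧ i < a + b then (1 : Int) else 0) =
      List.replicate a.toNat 0 ++ List.replicate b.toNat 1 ++ List.replicate c.toNat 0 := by
  rw [PySem.List.pyRange_one_append 0 a (a + b + c) ha (by omega),
      PySem.List.pyRange_one_append a (a + b) (a + b + c) (by omega) (by omega),
      List.map_append, List.map_append,
      map_pyRange_const 0 a 0 _ (fun x h1 h2 => if_neg (by omega)),
      map_pyRange_const a (a + b) 1 _ (fun x h1 h2 => if_pos ⟨h1, h2⟩),
      map_pyRange_const (a + b) (a + b + c) 0 _ (fun x h1 h2 => if_neg (by omega)),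
      show a - 0 = a from by ring, show a + b - a = b from by ring,
      show a + b + c - (a + b) = c from by ring, ← List.append_assoc]

-- ===== VERDICT (by name: the statement is the Claim_ definition above) =====
theorem rectangularWindow_spec : Claim_equal_rectangularWindow := by
  intro M _
  unfold Spec_rectangularWindow rectangularWindow rectangularWindow_alt
  have hk := PySem.Int.floordiv_mul_add_mod M 2
  have hr0 : 0 ≤ PySem.Int.mod M 2 := PySem.Int.mod_nonneg M (by norm_num)
  have hr2 : PySem.Int.mod M 2 < 2 := PySem.Int.mod_lt M (by norm_num)
  set k := PySem.Int.floordiv M 2 with hkdef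
  by_cases h : PySem.Int.mod M 2 = 0
  · -- even branch: M = 2*k
    rw [if_pos (beq_iff_eq.mpr h)]
    dsimp only
    rw [fold_ones]
    by_cases hM : 0 ≤ M
    · have h2M : 2 * M = k + M + (M - k) := by ring
      rw [h2M, alt_split k M (M - k) (by omega) hM (by omega),
          show k - -k = M from by omega, show M - k = k from by omega]
    · rw [PySem.List.pyRange_one_eq_nil (by omega),
          show k.toNat = 0 from Int.toNat_of_nonpos (by omega),
          show (k - -k).toNat = 0 from Int.toNat_of_nonpos (by omega)]
      simp
  · -- odd branch: M = 2*k + 1 and floordiv (M-1) 2 = k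
    have h1 : PySem.Int.mod M 2 = 1 := by omega
    rw [if_neg (by simp only [beq_iff_eq]; exact h)]
    dsimp only
    have hl : PySem.Int.floordiv (M - 1) 2 = k :=
      (PySem.Int.floordiv_eq_iff_of_pos (by norm_num)).mpr ⟨by omega, by omega⟩
    rw [hl, fold_ones]
    by_cases hM : 0 ≤ M
    · have h2M : 2 * M = k + M + (M - k) := by ring
      rw [h2M, alt_split k M (M - k) (by omega) hM (by omega),
          show k + 1 - -k = M from by omega, show M - k = k + 1 from by omega]
    · rw [PySem.List.pyRange_one_eq_nil (by omega),
          show k.toNat = 0 from Int.toNat_of_nonpos (by omega),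
          show (k + 1 - -k).toNat = 0 from Int.toNat_of_nonpos (by omega),
          show (k + 1).toNat = 0 from Int.toNat_of_nonpos (by omega)]
      simp
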